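-- pv_equiv track=rewrite | github.com/tondach01/corpmorpho | group_word_forms.py | extract_common_tags
-- ===== SOURCE A (Python) =====
-- from typing import TextIO, Dict, List
--
-- def extract_common_tags(tags: Dict[str, int]) -> List[str]:
--     common = []
--     sample = tags.popitem()[0]
--     for sub_tag in split_by_two(sample):
--         all_having = True
--         for tag in tags.keys():
--             if sub_tag not in tag:
--                 all_having = False
--                 break
--         if all_having:
--             common.append(sub_tag)
--     return common
--
-- def split_by_two(tag: str) -> List[str]:
--     slices = []
--     for i in range(len(tag) // 2):
--         slices.append(tag[2*i] + tag[2*i + 1])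
--     return slices
-- ===== SOURCE B (Python) =====
-- def extract_common_tags(tags):
--     # Note: like the original, this pops the last item off the caller's dict.
--     sample = tags.popitem()[0]
--     n = len(sample)
--     chunks = [sample[i:i + 2] for i in range(0, n - n % 2, 2)]
--     gram_sets = [{tag[i:i + 2] for i in range(len(tag) - 1)} for tag in tags]
--     if not gram_sets:
--         return chunks
--     common = set.intersection(*gram_sets)
--     return [c for c in chunks if c in common]
-- ===== Notes on version B (the rewrite author's own statement) =====
-- stated objective: alternative
-- what changed: B precomputes each remaining tag's set of length-2 substrings once and intersects these sets, then filters the sample's aligned 2-char chunks by set membership, instead of rescanning every tag with substring search for every chunk.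
import Mathlib
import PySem

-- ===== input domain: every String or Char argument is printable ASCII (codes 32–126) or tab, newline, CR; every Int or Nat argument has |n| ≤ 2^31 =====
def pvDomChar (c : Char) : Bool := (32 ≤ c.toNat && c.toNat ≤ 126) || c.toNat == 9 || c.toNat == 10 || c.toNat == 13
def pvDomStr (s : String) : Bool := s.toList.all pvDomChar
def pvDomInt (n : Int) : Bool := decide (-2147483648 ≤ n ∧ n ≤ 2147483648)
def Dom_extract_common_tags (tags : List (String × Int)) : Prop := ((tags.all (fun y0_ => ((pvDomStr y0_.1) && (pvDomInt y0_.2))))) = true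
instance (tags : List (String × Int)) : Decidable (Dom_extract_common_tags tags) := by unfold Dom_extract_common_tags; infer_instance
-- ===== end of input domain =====

-- B replaces A's per-chunk substring scan over all tags by one precomputed 2-gram set
-- per tag intersected once (objective: alternative algorithm; speed not claimed).
-- Both A and B pop the last item off the caller's dict (same observable mutation).

-- The Python argument is a dict; the association list is turned into the dict exactly
-- as dict(pairs) does (first key position, last value).  Shared by both ports.
def pvDictOf (tags : List (String × Int)) : PySem.Dict String Int :=
  tags.foldl (fun d p => d.insert p.1 p.2) PySem.Dict.empty

-- ===== PORT A =====
-- split_by_two: slices.append(tag[2*i] + tag[2*i+1]) for i in range(len(tag)//2)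
-- (indices 2*i, 2*i+1 are always in range, so getD's default is never used)
def split_by_two (t : List Char) : List (List Char) :=
  (List.range (t.length / 2)).foldl
    (fun slices i => slices ++ [[t.getD (2*i) ' ', t.getD (2*i+1) ' ']]) []

def extract_common_tags (tags : List (String × Int)) : List String :=
  let d := pvDictOf tags
  match d.items.getLast? with       -- tags.popitem(): last item; KeyError on empty dict (excluded by Pre_)
  | none => []
  | some (sample, _) =>
    let rest := d.items.dropLast    -- the dict after the pop
    (split_by_two sample.toList).foldl
      (fun common sub =>
        -- the for/break flag loop computes all(sub in tag for tag in rest)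
        if rest.all (fun p => PySem.Chars.isIn sub p.1.toList) then
          common ++ [String.ofList sub]
        else common) []

-- ===== PORT B =====
-- {tag[i:i+2] for i in range(len(tag)-1)}
def pvGrams (t : List Char) : PySem.Set (List Char) :=
  PySem.Set.ofList ((List.range (t.length - 1)).map (fun i => (t.drop i).take 2))

def extract_common_tags_alt (tags : List (String × Int)) : List String :=
  let d := pvDictOf tags
  match d.items.getLast? with       -- tags.popitem()[0]
  | none => []
  | some (sample, _) =>
    let s := sample.toList
    -- [sample[i:i+2] for i in range(0, n - n % 2, 2)]
    let chunks := (List.range (s.length / 2)).map (fun k => (s.drop (2*k)).take 2)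
    match (d.items.dropLast).map (fun p => pvGrams p.1.toList) with
    | [] => chunks.map String.ofList
    | g :: gs =>
      let common := gs.foldl (fun a b => PySem.Set.inter a b) g   -- set.intersection(*gram_sets)
      (chunks.filter (fun c => PySem.Set.contains common c)).map String.ofList

-- ===== PRECONDITION & SPEC =====
-- Pre_ excludes only the empty input: popitem() raises KeyError there (in both A and B).
def Pre_extract_common_tags (tags : List (String × Int)) : Prop := tags ≠ []
instance (tags : List (String × Int)) : Decidable (Pre_extract_common_tags tags) := by
  unfold Pre_extract_common_tags; infer_instance

def pvWitness_extract_common_tags : (List (String × Int)) := [("abcd", 1), ("xbc", 2)]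

def Spec_extract_common_tags (tags : List (String × Int)) (out : List String) : Prop := out = extract_common_tags_alt tags
instance (tags : List (String × Int)) (out : List String) : Decidable (Spec_extract_common_tags tags out) := by unfold Spec_extract_common_tags; infer_instance

-- ===== CLAIM (what is proved, stated in full; the proofs are below) =====
def Claim_equal_extract_common_tags : Prop := ∀ (tags : List (String × Int)), Dom_extract_common_tags tags → Pre_extract_common_tags tags → Spec_extract_common_tags tags (extract_common_tags tags)

-- ===== LEMMAS AND PROOFS =====

-- a length-2 window written by two indexings equals the slice
theorem take_two_drop (t : List Char) (i : Nat) (h : i + 2 ≤ t.length) :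
    (t.drop i).take 2 = [t.getD i ' ', t.getD (i+1) ' '] := by
  have h1 : i < t.length := by omega
  have h2 : i + 1 < t.length := by omega
  rw [List.getD_eq_getElem t ' ' h1, List.getD_eq_getElem t ' ' h2,
      List.drop_eq_getElem_cons h1, List.drop_eq_getElem_cons h2]
  rfl

-- A's split_by_two produces exactly B's chunk list
theorem split_by_two_eq (s : List Char) :
    split_by_two s = (List.range (s.length / 2)).map (fun k => (s.drop (2*k)).take 2) := by
  unfold split_by_two
  rw [PySem.List.foldl_append_singleton_eq_map, List.nil_append]
  refine List.map_congr_left ?_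
  intro k hk
  rw [List.mem_range] at hk
  rw [take_two_drop s (2*k) (by omega)]

-- every chunk has length exactly 2
theorem chunk_length {s c : List Char} {k : Nat} (hk : k < s.length / 2)
    (hc : c = (s.drop (2*k)).take 2) : c.length = 2 := by
  subst hc
  simp [List.length_take, List.length_drop]
  omega

-- for a 2-char chunk, 'sub in tag' is membership in the tag's 2-gram set
theorem isIn_iff_mem_grams (t c : List Char) (hc : c.length = 2) :
    PySem.Chars.isIn c t = true ↔ c ∈ pvGrams t := by
  rw [← PySem.Chars.exists_prefix_drop_iff_isIn]
  unfold pvGrams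
  rw [PySem.Set.mem_ofList, List.mem_map]
  constructor
  · rintro ⟨j, hj⟩
    have hlen : 2 ≤ (t.drop j).length := by
      have := hj.length_le; omega
    have hjt : j + 2 ≤ t.length := by
      rw [List.length_drop] at hlen; omega
    refine ⟨j, ?_, ?_⟩
    · rw [List.mem_range]; omega
    · have := List.prefix_iff_eq_take.mp hj
      rw [hc] at this
      exact this.symm
  · rintro ⟨j, _, hj⟩
    exact ⟨j, hj ▸ List.take_prefix 2 (t.drop j)⟩

-- membership in the folded intersection
theorem mem_foldl_inter {α : Type} [BEq α] [LawfulBEq α]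
    (gs : List (PySem.Set α)) (g : PySem.Set α) (x : α) :
    x ∈ gs.foldl (fun a b => PySem.Set.inter a b) g ↔ x ∈ g ∧ ∀ s ∈ gs, x ∈ s := by
  induction gs generalizing g with
  | nil => simp
  | cons h tl ih =>
    rw [List.foldl_cons, ih, PySem.Set.mem_inter]
    simp only [List.mem_cons]
    constructor
    · rintro ⟨⟨hg, hh⟩, htl⟩
      exact ⟨hg, fun s hs => hs.elim (fun e => e ▸ hh) (htl s)⟩
    · rintro ⟨hg, hall⟩
      exact ⟨⟨hg, hall h (Or.inl rfl)⟩, fun s hs => hall s (Or.inr hs)⟩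

-- ===== VERDICT (by name: the statement is the Claim_ definition above) =====
theorem extract_common_tags_spec : Claim_equal_extract_common_tags := by
  intro tags _ _
  unfold Spec_extract_common_tags extract_common_tags extract_common_tags_alt
  cases hlast : (pvDictOf tags).items.getLast? with
  | none => simp only [hlast]
  | some p =>
    obtain ⟨sample, v⟩ := p
    simp only [hlast]
    rw [PySem.List.foldl_append_if, List.nil_append, split_by_two_eq]
    cases hrest : (pvDictOf tags).items.dropLast with
    | nil =>
      simp
    | cons q qs =>
      simp only [List.map_cons]
      congr 1
      refine List.filter_congr ?_
      intro c hc
      rw [List.mem_map] at hc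
      obtain ⟨k, hk, hck⟩ := hc
      rw [List.mem_range] at hk
      have hclen : c.length = 2 := chunk_length hk hck.symm
      rw [Bool.eq_iff_iff, List.all_eq_true, PySem.Set.contains_iff, mem_foldl_inter]
      constructor
      · intro hall
        refine ⟨?_, ?_⟩
        · exact (isIn_iff_mem_grams _ c hclen).mp (hall q (by simp))
        · intro s hs
          rw [List.mem_map] at hs
          obtain ⟨p, hp, hps⟩ := hs
          exact hps ▸ (isIn_iff_mem_grams _ c hclen).mp (hall p (by simp [hp]))
      · rintro ⟨hq, hall⟩
        intro p hp
        rcases List.mem_cons.mp hp with hp | hp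
        · exact (isIn_iff_mem_grams _ c hclen).mpr (hp ▸ hq)
        · exact (isIn_iff_mem_grams _ c hclen).mpr
            (hall (pvGrams p.1.toList) (List.mem_map.mpr ⟨p, hp, rfl⟩))
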